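-- pv_equiv track=rewrite | github.com/adilhaimoura/cpu-a | cpu-a.py | parse_lshw_display
-- ===== SOURCE A (Python) =====
-- def parse_lshw_display(text):
--     entries = []
--     current = []
--     for line in text.splitlines():
--         if line.startswith("  *-display"):
--             if current:
--                 entries.append("\n".join(current))
--                 current = []
--         current.append(line.strip())
--     if current:
--         entries.append("\n".join(current))
--     return "\n\n".join(entries)
-- ===== SOURCE B (Python) =====
-- def parse_lshw_display(text):
--     def chunks(lines):
--         if not lines:
--             return []
--         pre = []
--         rest = lines[1:]
--         while rest and not rest[0].startswith("  *-display"):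
--             pre.append(rest[0])
--             rest = rest[1:]
--         return [[lines[0]] + pre] + chunks(rest)
--     return "\n\n".join(
--         "\n".join(l.strip() for l in c) for c in chunks(text.splitlines())
--     )
-- ===== Notes on version B (the rewrite author's own statement) =====
-- stated objective: alternative
-- what changed: Replaced A's single accumulator-flush loop (entries/current state mutated per line) with a recursive chunking pass that splits the line list at display-marker lines (first chunk = leading region) and then strips and joins each chunk.
import Mathlib
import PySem

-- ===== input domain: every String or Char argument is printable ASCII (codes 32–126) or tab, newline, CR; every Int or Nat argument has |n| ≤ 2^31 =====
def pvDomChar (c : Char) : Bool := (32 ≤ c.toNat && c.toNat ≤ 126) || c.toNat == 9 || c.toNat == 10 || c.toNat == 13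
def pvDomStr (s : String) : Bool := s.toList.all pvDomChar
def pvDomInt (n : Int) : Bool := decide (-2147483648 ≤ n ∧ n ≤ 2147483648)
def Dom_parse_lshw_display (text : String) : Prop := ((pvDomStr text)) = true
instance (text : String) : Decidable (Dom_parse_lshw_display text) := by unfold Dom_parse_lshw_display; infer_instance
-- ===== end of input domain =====

-- B replaces A's accumulator-flush loop by a recursive chunking of the line list at
-- "  *-display" markers (objective: alternative decomposition, same cost).

-- ===== PORT A =====
-- the body of A's for-loop over text.splitlines(), state = (entries, current)
def pvStepA (st : List String × List String) (line : String) : List String × List String :=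
  let st :=
    if PySem.Str.startswith line "  *-display" then
      (if st.2 ≠ [] then (st.1 ++ [PySem.Str.join "\n" st.2], ([] : List String)) else st)
    else st
  (st.1, st.2 ++ [PySem.Str.strip line])

def parse_lshw_display (text : String) : String :=
  let st := (PySem.Str.splitlines text).foldl pvStepA ([], [])
  let entries := if st.2 ≠ [] then st.1 ++ [PySem.Str.join "\n" st.2] else st.1
  PySem.Str.join "\n\n" entries

-- ===== PORT B =====
-- Source B's while loop collects the lines up to the next marker (takeWhile) and
-- recurses on the remainder (dropWhile).
def pvNm (x : String) : Bool := !(PySem.Str.startswith x "  *-display")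

def pvChunksB : List String → List (List String)
  | [] => []
  | l :: ls =>
    (l :: ls.takeWhile pvNm) :: pvChunksB (ls.dropWhile pvNm)
  termination_by ls => ls.length
  decreasing_by
    exact Nat.lt_succ_of_le (List.length_dropWhile_le _ _)

def parse_lshw_display_alt (text : String) : String :=
  PySem.Str.join "\n\n"
    ((pvChunksB (PySem.Str.splitlines text)).map
      (fun c => PySem.Str.join "\n" (c.map PySem.Str.strip)))

-- ===== PRECONDITION & SPEC =====
def Spec_parse_lshw_display (text : String) (out : String) : Prop := out = parse_lshw_display_alt text
instance (text : String) (out : String) : Decidable (Spec_parse_lshw_display text out) := by unfold Spec_parse_lshw_display; infer_instance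

-- ===== CLAIM (what is proved, stated in full; the proofs are below) =====
def Claim_equal_parse_lshw_display : Prop := ∀ (text : String), Dom_parse_lshw_display text → Spec_parse_lshw_display text (parse_lshw_display text)

-- ===== LEMMAS AND PROOFS =====

-- A's finalisation step: flush the pending current block
def pvFin (st : List String × List String) : List String :=
  if st.2 ≠ [] then st.1 ++ [PySem.Str.join "\n" st.2] else st.1

def pvEnt (ls : List String) : List String :=
  (pvChunksB ls).map (fun c => PySem.Str.join "\n" (c.map PySem.Str.strip))

lemma pvLoopA (lines : List String) : ∀ es cur, cur ≠ [] →
    pvFin (lines.foldl pvStepA (es, cur)) =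
      es ++ [PySem.Str.join "\n" (cur ++ (lines.takeWhile pvNm).map PySem.Str.strip)]
         ++ pvEnt (lines.dropWhile pvNm) := by
  induction lines with
  | nil =>
    intro es cur h
    simp [pvFin, pvEnt, pvChunksB, h]
  | cons l ls ih =>
    intro es cur h
    by_cases hm : PySem.Str.startswith l "  *-display" = true
    · have hnm : pvNm l = false := by unfold pvNm; rw [hm]; rfl
      simp only [List.foldl_cons, pvStepA, hm, if_pos, h, ne_eq, not_false_eq_true,
        List.takeWhile_cons, List.dropWhile_cons, hnm, Bool.false_eq_true, if_false]
      rw [ih (es ++ [PySem.Str.join "\n" cur]) ([] ++ [PySem.Str.strip l]) (by simp)]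
      simp only [pvEnt, pvChunksB]
      simp
    · have hnm : pvNm l = true := by unfold pvNm; rw [Bool.eq_false_iff.mpr hm]; rfl
      simp only [List.foldl_cons, pvStepA, hm, Bool.false_eq_true, if_false,
        List.takeWhile_cons, List.dropWhile_cons, hnm, if_true]
      rw [ih es (cur ++ [PySem.Str.strip l]) (by simp [h])]
      simp
lemma pvTopA (lines : List String) :
    pvFin (lines.foldl pvStepA ([], [])) = pvEnt lines := by
  cases lines with
  | nil => simp [pvFin, pvEnt, pvChunksB]
  | cons l ls =>
    have hstep : pvStepA ([], []) l = ([], [PySem.Str.strip l]) := by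
      by_cases hm : PySem.Str.startswith l "  *-display" = true <;>
        simp only [pvStepA, hm, Bool.false_eq_true, ne_eq, not_true_eq_false, if_false,
          if_true, List.nil_append]
    rw [List.foldl_cons, hstep, pvLoopA ls [] [PySem.Str.strip l] (by simp)]
    simp only [pvEnt, pvChunksB]
    simp

-- ===== VERDICT (by name: the statement is the Claim_ definition above) =====
theorem parse_lshw_display_spec : Claim_equal_parse_lshw_display := by
  intro text _
  unfold Spec_parse_lshw_display parse_lshw_display parse_lshw_display_alt
  exact congrArg (PySem.Str.join "\n\n") (pvTopA (PySem.Str.splitlines text))
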